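-- pv_equiv track=rewrite | github.com/TheAlgorithms/Python | hashes/fletcher16.py | fletcher16
-- ===== SOURCE A (Python) =====
-- def fletcher16(metin: str) -> int:
--     """
--     Verideki her karakteri döngüyle gez ve iki toplamaya ekle.
--
--     >>> fletcher16('hello world')
--     6752
--     >>> fletcher16('onethousandfourhundredthirtyfour')
--     28347
--     >>> fletcher16('The quick brown fox jumps over the lazy dog.')
--     5655
--     """
--     veri = bytes(metin, "ascii")
--     toplam1 = 0
--     toplam2 = 0
--     for karakter in veri:
--         toplam1 = (toplam1 + karakter) % 255
--         toplam2 = (toplam1 + toplam2) % 255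
--     return (toplam2 << 8) | toplam1
-- ===== SOURCE B (Python) =====
-- def fletcher16(metin: str) -> int:
--     veri = bytes(metin, "ascii")
--     n = len(veri)
--     toplam1 = sum(veri) % 255
--     toplam2 = sum((n - i) * b for i, b in enumerate(veri)) % 255
--     return (toplam2 << 8) | toplam1
-- ===== Notes on version B (the rewrite author's own statement) =====
-- stated objective: alternative
-- what changed: Replaces A's single coupled loop (both running sums reduced mod 255 at every step) by two independent aggregates - a plain byte sum and a weighted sum((n-i)*b) equal to the sum of prefix sums - each reduced mod 255 exactly once at the end.
import Mathlib
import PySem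

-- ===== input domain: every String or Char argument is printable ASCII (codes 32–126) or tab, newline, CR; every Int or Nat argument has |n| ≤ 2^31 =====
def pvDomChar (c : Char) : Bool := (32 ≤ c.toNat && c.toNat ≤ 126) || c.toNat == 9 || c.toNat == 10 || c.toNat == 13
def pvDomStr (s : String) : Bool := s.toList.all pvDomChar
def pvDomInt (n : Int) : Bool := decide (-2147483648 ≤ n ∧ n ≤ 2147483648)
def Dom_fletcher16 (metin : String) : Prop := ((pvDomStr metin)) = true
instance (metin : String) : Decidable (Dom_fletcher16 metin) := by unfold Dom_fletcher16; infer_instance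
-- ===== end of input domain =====

-- B computes the two Fletcher sums as separate aggregates (plain byte sum, and a
-- weighted sum with a single final mod 255) instead of threading both sums through
-- one coupled loop with a per-step reduction; objective: alternative decomposition.

-- ===== PORT A =====
-- one loop over the bytes, both running sums reduced mod 255 at every step
def fletcher16 (metin : String) : Int :=
  let veri : List Int := metin.toList.map (fun c => (c.toNat : Int))
  let st : Int × Int := veri.foldl
    (fun (st : Int × Int) (karakter : Int) =>
      let toplam1 := (st.1 + karakter) % 255
      let toplam2 := (toplam1 + st.2) % 255
      (toplam1, toplam2)) (0, 0)
  PySem.Int.bor (st.2 <<< (8 : Nat)) st.1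

-- ===== PORT B =====
-- two independent aggregates, each reduced mod 255 once at the end
def fletcher16_alt (metin : String) : Int :=
  let veri : List Int := metin.toList.map (fun c => (c.toNat : Int))
  let n : Int := veri.length
  let toplam1 := veri.sum % 255
  let toplam2 := ((PySem.List.enumerate veri).map (fun p => (n - p.1) * p.2)).sum % 255
  PySem.Int.bor (toplam2 <<< (8 : Nat)) toplam1

-- ===== PRECONDITION & SPEC =====
def Spec_fletcher16 (metin : String) (out : Int) : Prop := out = fletcher16_alt metin
instance (metin : String) (out : Int) : Decidable (Spec_fletcher16 metin out) := by unfold Spec_fletcher16; infer_instance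

-- ===== CLAIM (what is proved, stated in full; the proofs are below) =====
def Claim_equal_fletcher16 : Prop := ∀ (metin : String), Dom_fletcher16 metin → Spec_fletcher16 metin (fletcher16 metin)

-- ===== LEMMAS AND PROOFS =====

/-- The "sum of prefix sums" of a list, written back-to-front:
    each element is weighted by the number of prefixes it belongs to. -/
def wsum : List Int → Int
  | [] => 0
  | k :: r => ((r.length : Int) + 1) * k + wsum r

theorem emod_idem (x : Int) : x % 255 % 255 = x % 255 :=
  Int.emod_emod_of_dvd x dvd_rfl

/-- A's loop invariant: starting from an already-reduced state `(a, b)`,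
    the fold lands on the reduced total sum and reduced weighted sum. -/
theorem foldA_eq (l : List Int) : ∀ (a b : Int), a % 255 = a → b % 255 = b →
    l.foldl (fun (st : Int × Int) (karakter : Int) =>
      let toplam1 := (st.1 + karakter) % 255
      let toplam2 := (toplam1 + st.2) % 255
      (toplam1, toplam2)) (a, b)
    = ((a + l.sum) % 255, (b + (l.length : Int) * a + wsum l) % 255) := by
  induction l with
  | nil =>
    intro a b ha hb
    simp [wsum, ha, hb]
  | cons k r ih =>
    intro a b ha hb
    have hm : ∀ x : Int, Int.ModEq 255 (x % 255) x := fun x => emod_idem x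
    simp only [List.foldl_cons]
    rw [ih ((a + k) % 255) (((a + k) % 255 + b) % 255) (emod_idem _) (emod_idem _)]
    simp only [Prod.mk.injEq, List.sum_cons]
    refine ⟨?_, ?_⟩
    · -- first component: linear, omega handles the constant modulus
      omega
    · -- second component: modular arithmetic with a product
      have e1 : Int.ModEq 255 (((a + k) % 255 + b) % 255) (a + k + b) :=
        (hm _).trans ((hm (a + k)).add_right b)
      have e2 : Int.ModEq 255 ((r.length : Int) * ((a + k) % 255)) ((r.length : Int) * (a + k)) :=
        (hm (a + k)).mul_left _
      have e3 := (e1.add e2).add_right (wsum r)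
      calc (((a + k) % 255 + b) % 255 + (r.length : Int) * ((a + k) % 255) + wsum r) % 255
          = (a + k + b + (r.length : Int) * (a + k) + wsum r) % 255 := e3
        _ = (b + ((k :: r).length : Int) * a + wsum (k :: r)) % 255 := by
            simp only [List.length_cons, wsum]
            push_cast
            ring_nf

/-- B's weighted enumerate sum is `wsum` when the weight base sits one past the end. -/
theorem enumSum_eq (l : List Int) : ∀ (s c : Int), c = s + l.length →
    ((PySem.List.enumerate l s).map (fun p => (c - p.1) * p.2)).sum = wsum l := by
  induction l with
  | nil => intro s c h; simp [PySem.List.enumerate_nil, wsum]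
  | cons k r ih =>
    intro s c h
    rw [PySem.List.enumerate_cons]
    simp only [List.map_cons, List.sum_cons, wsum]
    rw [ih (s + 1) c (by simp at h ⊢; omega)]
    have : c - s = (r.length : Int) + 1 := by simp at h; omega
    rw [this]

-- ===== VERDICT (by name: the statement is the Claim_ definition above) =====
theorem fletcher16_spec : Claim_equal_fletcher16 := by
  intro metin _
  unfold Spec_fletcher16 fletcher16 fletcher16_alt
  simp only []
  rw [foldA_eq _ 0 0 (by decide) (by decide),
      enumSum_eq _ 0 _ (by simp)]
  simp
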